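-- pv_equiv track=rewrite | github.com/eliewolfe/ws2025 | utils.py | _hypergraph_full_cleanup
-- ===== SOURCE A (Python) =====
-- from typing import List, Tuple, Set
--
-- def _hypergraph_full_cleanup(hypergraph: List[Tuple[Tuple[int,...], Tuple[int,...]]]) -> Set[Tuple[Tuple[int,...], Tuple[int,...]]]:
--   hypergraph_copy = set(hypergraph)
--   cleaned_hypergraph_copy = hypergraph_copy.copy()
--   for dominating_hyperedge in hypergraph_copy:
--     if dominating_hyperedge in cleaned_hypergraph_copy:
--       dominated_hyperedges = []
--       for dominated_hyperedge in cleaned_hypergraph_copy: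
--         if not _factorization_subset(dominating_hyperedge, dominated_hyperedge):
--           continue
--         if dominated_hyperedge == dominating_hyperedge:
--           continue
--         if tuple(reversed(dominated_hyperedge)) == dominating_hyperedge:
--           continue
--         dominated_hyperedges.append(dominated_hyperedge)
--       cleaned_hypergraph_copy.difference_update(dominated_hyperedges)
--   return cleaned_hypergraph_copy
--
-- def _factorization_subset(
--   set1:Tuple[Tuple[int,...], Tuple[int,...]],
--   set2:Tuple[Tuple[int,...], Tuple[int,...]]) -> bool:
--   """
--   Check if the pair set2 has elements all of which are subsets of elements of set1.
--   """
--   set1 = tuple(map(set, set1))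
--   set2 = tuple(map(set, set2))
--   return (
--     (set1[0].issuperset(set2[0]) and set1[1].issuperset(set2[1]))
--     or
--     (set1[0].issuperset(set2[1]) and set1[1].issuperset(set2[0]))
--     )
-- ===== SOURCE B (Python) =====
-- from typing import List, Tuple, Set
--
-- def _hypergraph_full_cleanup(hypergraph: List[Tuple[Tuple[int,...], Tuple[int,...]]]) -> Set[Tuple[Tuple[int,...], Tuple[int,...]]]:
--   distinct = set(hypergraph)
--   return {h for h in distinct
--           if not any(_strictly_dominates(o, h) for o in distinct)}
--
-- def _strictly_dominates(o, h):
--   # o strictly dominates h: o covers h componentwise (possibly swapped),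
--   # and o is neither h nor the reversal of h.
--   if o == h or (o[1], o[0]) == h:
--     return False
--   o0, o1 = set(o[0]), set(o[1])
--   h0, h1 = set(h[0]), set(h[1])
--   return (o0 >= h0 and o1 >= h1) or (o0 >= h1 and o1 >= h0)
-- ===== Notes on version B (the rewrite author's own statement) =====
-- stated objective: simpler
-- what changed: Replaces the eliminate-the-dominated strategy (a mutable shrinking set with a presence guard and batched difference_update) by a single keep-the-maximal comprehension: keep exactly the hyperedges no other distinct non-reversed hyperedge dominates.
-- outside the precondition, e.g. on _hypergraph_full_cleanup([((1, 2), (3,)), ((2, 1), (3,))]): A returns {((2, 1), (3,))}, B returns set()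
import Mathlib
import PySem

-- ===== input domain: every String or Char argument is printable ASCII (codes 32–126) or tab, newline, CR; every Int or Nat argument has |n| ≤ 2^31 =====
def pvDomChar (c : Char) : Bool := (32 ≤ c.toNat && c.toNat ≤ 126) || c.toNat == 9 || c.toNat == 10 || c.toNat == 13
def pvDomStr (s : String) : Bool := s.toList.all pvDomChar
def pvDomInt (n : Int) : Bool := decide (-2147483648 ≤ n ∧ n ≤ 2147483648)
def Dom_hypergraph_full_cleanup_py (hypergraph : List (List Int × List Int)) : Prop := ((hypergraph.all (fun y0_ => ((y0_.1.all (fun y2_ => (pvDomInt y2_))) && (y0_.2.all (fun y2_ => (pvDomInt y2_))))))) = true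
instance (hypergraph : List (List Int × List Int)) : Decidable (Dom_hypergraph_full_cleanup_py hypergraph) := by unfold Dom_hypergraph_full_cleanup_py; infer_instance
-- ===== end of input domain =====

-- B replaces A's eliminate-the-dominated loop (mutable shrinking set with a presence guard and
-- batched difference_update) by a single keep-the-maximal filter; same cost, simpler.

-- ===== PORT A =====
-- port of _factorization_subset (builds the four Python sets, checks the two superset combinations)
def factSubset (s1 s2 : List Int × List Int) : Bool :=
  let a0 := PySem.Set.ofList s1.1
  let a1 := PySem.Set.ofList s1.2
  let b0 := PySem.Set.ofList s2.1
  let b1 := PySem.Set.ofList s2.2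
  (PySem.Set.issuperset a0 b0 && PySem.Set.issuperset a1 b1)
    || (PySem.Set.issuperset a0 b1 && PySem.Set.issuperset a1 b0)

-- one iteration of A's outer loop: the presence guard, the inner loop collecting
-- dominated_hyperedges (its three 'continue's in order), then difference_update
def cleanupStep (cleaned : List (List Int × List Int)) (dominating : List Int × List Int) :
    List (List Int × List Int) :=
  if PySem.Set.contains cleaned dominating then
    let dominated := cleaned.foldl (fun acc h =>
      if !factSubset dominating h then acc
      else if h == dominating then acc
      else if (h.2, h.1) == dominating then acc
      else acc ++ [h]) []
    PySem.Set.diff cleaned dominated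
  else cleaned

def hypergraph_full_cleanup_py (hypergraph : List (List Int × List Int)) : List (List Int × List Int) :=
  let hypergraph_copy := PySem.Set.ofList hypergraph
  hypergraph_copy.foldl cleanupStep hypergraph_copy

-- ===== PORT B =====
-- port of Source B's _strictly_dominates (early-out on equal/reversed, then the set comparisons)
def strictlyDominates (o h : List Int × List Int) : Bool :=
  if o == h || (o.2, o.1) == h then false
  else
    let o0 := PySem.Set.ofList o.1
    let o1 := PySem.Set.ofList o.2
    let h0 := PySem.Set.ofList h.1
    let h1 := PySem.Set.ofList h.2
    (PySem.Set.issuperset o0 h0 && PySem.Set.issuperset o1 h1)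
      || (PySem.Set.issuperset o0 h1 && PySem.Set.issuperset o1 h0)

def hypergraph_full_cleanup_py_alt (hypergraph : List (List Int × List Int)) : List (List Int × List Int) :=
  let distinct := PySem.Set.ofList hypergraph
  distinct.filter (fun h => !(distinct.any (fun o => strictlyDominates o h)))

-- ===== PRECONDITION & SPEC =====
-- pvCoversB a b = _factorization_subset(a, b): each component of b covered by one of a, directly or swapped
def pvCoversB (a b : List Int × List Int) : Bool :=
  (b.1.all (fun x => decide (x ∈ a.1)) && b.2.all (fun x => decide (x ∈ a.2)))
    || (b.2.all (fun x => decide (x ∈ a.1)) && b.1.all (fun x => decide (x ∈ a.2)))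

-- Pre_ excludes hypergraphs containing two distinct, non-reversed hyperedges that dominate each
-- other (the same set-pair written as different tuples): there A keeps whichever of the tied pair
-- Python's set-iteration (hash) order happens to favour — an accidental tie-break.
def Pre_hypergraph_full_cleanup_py (hypergraph : List (List Int × List Int)) : Prop :=
  ∀ a ∈ hypergraph, ∀ b ∈ hypergraph,
    a ≠ b → (b.2, b.1) ≠ a → ¬(pvCoversB a b = true ∧ pvCoversB b a = true)
instance (hypergraph : List (List Int × List Int)) : Decidable (Pre_hypergraph_full_cleanup_py hypergraph) := by
  unfold Pre_hypergraph_full_cleanup_py; infer_instance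

def pvWitness_hypergraph_full_cleanup_py : (List (List Int × List Int)) :=
  [([1, 2], [3]), ([1], [3])]

def Spec_hypergraph_full_cleanup_py (hypergraph : List (List Int × List Int)) (out : List (List Int × List Int)) : Prop := out = hypergraph_full_cleanup_py_alt hypergraph
instance (hypergraph : List (List Int × List Int)) (out : List (List Int × List Int)) : Decidable (Spec_hypergraph_full_cleanup_py hypergraph out) := by unfold Spec_hypergraph_full_cleanup_py; infer_instance

-- ===== CLAIM (what is proved, stated in full; the proofs are below) =====
def Claim_equal_hypergraph_full_cleanup_py : Prop := ∀ (hypergraph : List (List Int × List Int)), Dom_hypergraph_full_cleanup_py hypergraph → Pre_hypergraph_full_cleanup_py hypergraph → Spec_hypergraph_full_cleanup_py hypergraph (hypergraph_full_cleanup_py hypergraph)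

-- ===== LEMMAS AND PROOFS =====

-- A removes h while processing o  iff  rB o h (the conjunction of the three 'continue' tests)
def rB (o h : List Int × List Int) : Bool :=
  factSubset o h && !(h == o) && !((h.2, h.1) == o)

-- m is kept by B, and never removed by A: no element of the hypergraph strictly dominates it
def pvIsMax (hg : List (List Int × List Int)) (m : List Int × List Int) : Prop :=
  ∀ o ∈ hg, ¬ rB o m = true

theorem factSubset_eq_pvCoversB (a b : List Int × List Int) :
    factSubset a b = pvCoversB a b := by
  simp only [factSubset, pvCoversB, PySem.Set.issuperset, PySem.Set.issubset]
  congr 2 <;> rw [Bool.eq_iff_iff] <;> simp [List.all_eq_true, PySem.Set.mem_ofList]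

theorem rev_eq_comm (o h : List Int × List Int) : (h.2, h.1) = o ↔ (o.2, o.1) = h := by
  constructor <;> (rintro rfl; simp)

theorem pvCoversB_rev_right (a b : List Int × List Int) :
    pvCoversB a (b.2, b.1) = pvCoversB a b := by
  simp only [pvCoversB]
  exact Bool.or_comm ..

theorem pvCoversB_trans {a b c : List Int × List Int}
    (h1 : pvCoversB a b = true) (h2 : pvCoversB b c = true) : pvCoversB a c = true := by
  simp only [pvCoversB, Bool.or_eq_true, Bool.and_eq_true, List.all_eq_true,
    decide_eq_true_eq] at *
  rcases h1 with ⟨p1, p2⟩ | ⟨p1, p2⟩ <;> rcases h2 with ⟨q1, q2⟩ | ⟨q1, q2⟩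
  · exact Or.inl ⟨fun x hx => p1 x (q1 x hx), fun x hx => p2 x (q2 x hx)⟩
  · exact Or.inr ⟨fun x hx => p1 x (q1 x hx), fun x hx => p2 x (q2 x hx)⟩
  · exact Or.inr ⟨fun x hx => p1 x (q2 x hx), fun x hx => p2 x (q1 x hx)⟩
  · exact Or.inl ⟨fun x hx => p1 x (q2 x hx), fun x hx => p2 x (q1 x hx)⟩

theorem rB_iff (o h : List Int × List Int) :
    rB o h = true ↔ pvCoversB o h = true ∧ h ≠ o ∧ (h.2, h.1) ≠ o := by
  simp [rB, factSubset_eq_pvCoversB, and_assoc]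

theorem rB_irrefl (o : List Int × List Int) : rB o o = false := by
  simp [rB]

theorem rB_trans {hg : List (List Int × List Int)}
    (pre : Pre_hypergraph_full_cleanup_py hg)
    {a b c : List Int × List Int} (ha : a ∈ hg) (hb : b ∈ hg)
    (h1 : rB a b = true) (h2 : rB b c = true) : rB a c = true := by
  rw [rB_iff] at h1 h2 ⊢
  obtain ⟨c1, ne1, nr1⟩ := h1
  obtain ⟨c2, ne2, nr2⟩ := h2
  refine ⟨pvCoversB_trans c1 c2, ?_, ?_⟩
  · intro hca
    exact pre a ha b hb (Ne.symm ne1) nr1 ⟨c1, hca ▸ c2⟩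
  · intro hra
    refine pre a ha b hb (Ne.symm ne1) nr1 ⟨c1, ?_⟩
    rw [← hra, pvCoversB_rev_right]
    exact c2

theorem countP_lt_countP {β : Type} {l : List β} {p q : β → Bool}
    (hpq : ∀ x ∈ l, p x = true → q x = true) {x : β} (hx : x ∈ l)
    (hqx : q x = true) (hpx : p x = false) : l.countP p < l.countP q := by
  induction l with
  | nil => cases hx
  | cons a t ih =>
    rw [List.countP_cons, List.countP_cons]
    rcases List.mem_cons.mp hx with rfl | hxt
    · have hle := List.countP_mono_left (fun y hy => hpq y (List.mem_cons_of_mem _ hy))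
      simp [hpx, hqx]; omega
    · have hlt := ih (fun y hy => hpq y (List.mem_cons_of_mem _ hy)) hxt
      have : p a = true → q a = true := hpq a List.mem_cons_self
      by_cases hpa : p a = true
      · simp [hpa, this hpa]; omega
      · simp only [Bool.not_eq_true] at hpa
        simp [hpa]; split <;> omega

theorem exists_max_dominator {hg : List (List Int × List Int)}
    (pre : Pre_hypergraph_full_cleanup_py hg) :
    ∀ (n : Nat) (h : List Int × List Int), h ∈ hg →
      hg.countP (fun o => rB o h) ≤ n →
      (∃ o ∈ hg, rB o h = true) →
      ∃ m ∈ hg, pvIsMax hg m ∧ rB m h = true := by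
  intro n
  induction n with
  | zero =>
    intro h _ hcnt ⟨o, ho, hro⟩
    have : 0 < hg.countP (fun o => rB o h) := List.countP_pos_iff.mpr ⟨o, ho, hro⟩
    omega
  | succ n ih =>
    intro h hh hcnt ⟨o, ho, hro⟩
    by_cases hmax : pvIsMax hg o
    · exact ⟨o, ho, hmax, hro⟩
    · simp only [pvIsMax, not_forall] at hmax
      obtain ⟨p, hp, hrp⟩ := hmax
      simp only [not_not] at hrp
      have hlt : hg.countP (fun q => rB q o) < hg.countP (fun q => rB q h) :=
        countP_lt_countP (fun q hq hqo => rB_trans pre hq ho hqo hro) ho hro (rB_irrefl o)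
      obtain ⟨m, hm, hmmax, hmo⟩ := ih o ho (by omega) ⟨p, hp, hrp⟩
      exact ⟨m, hm, hmmax, rB_trans pre hm ho hmo hro⟩

theorem cleanupStep_eq (cleaned : List (List Int × List Int)) (dom : List Int × List Int) :
    cleanupStep cleaned dom =
      if dom ∈ cleaned then cleaned.filter (fun h => !rB dom h) else cleaned := by
  unfold cleanupStep
  have hguard : PySem.Set.contains cleaned dom = decide (dom ∈ cleaned) := by
    rw [Bool.eq_iff_iff]; simp
  rw [hguard]
  by_cases hmem : dom ∈ cleaned
  · simp only [hmem, decide_true, if_true]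
    have hfun : (fun (acc : List (List Int × List Int)) h =>
        if !factSubset dom h then acc
        else if h == dom then acc
        else if (h.2, h.1) == dom then acc
        else acc ++ [h]) =
        (fun acc h => if rB dom h then acc ++ [h] else acc) := by
      funext acc h
      cases hf : factSubset dom h <;> cases he : h == dom <;> cases hr : (h.2, h.1) == dom <;>
        simp [rB, hf, he, hr]
    rw [hfun, PySem.List.foldl_append_if_eq_filter, List.nil_append]
    simp only [PySem.Set.diff]
    refine List.filter_congr fun h hh => ?_
    congr 1
    rw [Bool.eq_iff_iff]
    simp [List.mem_filter, hh]
  · simp [hmem]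

theorem fold_invariant {hg : List (List Int × List Int)} :
    ∀ (todo cleaned : List (List Int × List Int)),
      (∀ x ∈ todo, x ∈ hg) →
      (∀ m ∈ hg, pvIsMax hg m → m ∈ cleaned) →
      (todo.foldl cleanupStep cleaned).Sublist cleaned ∧
      (∀ m ∈ hg, pvIsMax hg m → m ∈ todo.foldl cleanupStep cleaned) ∧
      (∀ h m, m ∈ todo → pvIsMax hg m → rB m h = true → h ∉ todo.foldl cleanupStep cleaned) := by
  intro todo
  induction todo with
  | nil =>
    intro cleaned _ hmaxin
    exact ⟨List.Sublist.refl _, fun m hm hmax => hmaxin m hm hmax, fun h m hm => absurd hm (List.not_mem_nil)⟩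
  | cons dom rest ih =>
    intro cleaned htodo hmaxin
    have hdomhg : dom ∈ hg := htodo dom List.mem_cons_self
    have hstep_sub : (cleanupStep cleaned dom).Sublist cleaned := by
      rw [cleanupStep_eq]; split
      · exact List.filter_sublist
      · exact List.Sublist.refl _
    have hmaxin' : ∀ m ∈ hg, pvIsMax hg m → m ∈ cleanupStep cleaned dom := by
      intro m hm hmax
      rw [cleanupStep_eq]; split
      · refine List.mem_filter.mpr ⟨hmaxin m hm hmax, ?_⟩
        simp only [Bool.not_eq_eq_eq_not, Bool.not_true]
        exact Bool.not_eq_true _ ▸ (Bool.eq_false_iff.mpr (hmax dom hdomhg) : rB dom m = false)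
      · exact hmaxin m hm hmax
    obtain ⟨ih_sub, ih_max, ih_rm⟩ :=
      ih (cleanupStep cleaned dom) (fun x hx => htodo x (List.mem_cons_of_mem dom hx)) hmaxin'
    rw [List.foldl_cons]
    refine ⟨ih_sub.trans hstep_sub, ih_max, ?_⟩
    intro h m hm hmax hrm
    rcases List.mem_cons.mp hm with rfl | hmrest
    · -- m = dom is processed now; it is present, so h is removed here and never returns
      intro hmemF
      have hh' : h ∈ cleanupStep cleaned m := ih_sub.subset hmemF
      rw [cleanupStep_eq] at hh'
      have hmin : m ∈ cleaned := hmaxin m hdomhg hmax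
      rw [if_pos hmin] at hh'
      have := (List.mem_filter.mp hh').2
      rw [hrm] at this
      simp at this
    · exact ih_rm h m hmrest hmax hrm

theorem mem_result_iff {hg : List (List Int × List Int)}
    (pre : Pre_hypergraph_full_cleanup_py hg) (h : List Int × List Int) :
    h ∈ hypergraph_full_cleanup_py hg ↔ h ∈ hg ∧ pvIsMax hg h := by
  obtain ⟨hsub, hmax, hrm⟩ :=
    fold_invariant (hg := hg) (PySem.Set.ofList hg) (PySem.Set.ofList hg)
      (fun x hx => (PySem.Set.mem_ofList hg x).mp hx)
      (fun m hm _ => (PySem.Set.mem_ofList hg m).mpr hm)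
  show h ∈ (PySem.Set.ofList hg).foldl cleanupStep (PySem.Set.ofList hg) ↔ _
  constructor
  · intro hF
    have hhg : h ∈ hg := (PySem.Set.mem_ofList hg h).mp (hsub.subset hF)
    refine ⟨hhg, ?_⟩
    by_contra hnmax
    simp only [pvIsMax, not_forall] at hnmax
    obtain ⟨o, ho, hro⟩ := hnmax
    simp only [not_not] at hro
    obtain ⟨m, hm, hmmax, hmh⟩ :=
      exists_max_dominator pre (hg.countP (fun o => rB o h)) h hhg le_rfl ⟨o, ho, hro⟩
    exact hrm h m ((PySem.Set.mem_ofList hg m).mpr hm) hmmax hmh hF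
  · intro ⟨hhg, hismax⟩
    exact hmax h hhg hismax

theorem strictlyDominates_eq_rB (o h : List Int × List Int) :
    strictlyDominates o h = rB o h := by
  by_cases e1 : o = h
  · subst e1; simp [strictlyDominates, rB_irrefl]
  · by_cases e2 : (o.2, o.1) = h
    · have e2' : (h.2, h.1) = o := (rev_eq_comm o h).mpr e2
      simp [strictlyDominates, rB, e2, e2']
    · have e2' : ¬ (h.2, h.1) = o := fun hc => e2 ((rev_eq_comm o h).mp hc)
      have e1' : ¬ h = o := fun hc => e1 hc.symm
      have b1 : (h == o) = false := by simp [e1']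
      have b2 : ((h.2, h.1) == o) = false := by simp [e2']
      simp [strictlyDominates, rB, factSubset, e1, e2, b1, b2]

theorem alt_eq_filter (hg : List (List Int × List Int)) :
    hypergraph_full_cleanup_py_alt hg =
      (PySem.Set.ofList hg).filter
        (fun h => !((PySem.Set.ofList hg).any (fun o => rB o h))) := by
  show (PySem.Set.ofList hg).filter _ = _
  refine List.filter_congr fun h _ => ?_
  simp only [strictlyDominates_eq_rB]

theorem mem_alt_iff (hg : List (List Int × List Int)) (h : List Int × List Int) :
    h ∈ hypergraph_full_cleanup_py_alt hg ↔ h ∈ hg ∧ pvIsMax hg h := by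
  rw [alt_eq_filter, List.mem_filter]
  constructor
  · rintro ⟨h1, h2⟩
    refine ⟨(PySem.Set.mem_ofList hg h).mp h1, ?_⟩
    intro o ho hro
    have hany : (PySem.Set.ofList hg).any (fun o => rB o h) = true :=
      List.any_eq_true.mpr ⟨o, (PySem.Set.mem_ofList hg o).mpr ho, hro⟩
    rw [hany] at h2
    simp at h2
  · rintro ⟨h1, h2⟩
    refine ⟨(PySem.Set.mem_ofList hg h).mpr h1, ?_⟩
    simp only [Bool.not_eq_eq_eq_not, Bool.not_true, List.any_eq_false]
    intro o ho
    exact h2 o ((PySem.Set.mem_ofList hg o).mp ho)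

theorem sublist_eq_of_nodup {β : Type} : ∀ {l l1 l2 : List β},
    l1.Sublist l → l2.Sublist l → l.Nodup → (∀ x, x ∈ l1 ↔ x ∈ l2) → l1 = l2 := by
  intro l
  induction l with
  | nil =>
    intro l1 l2 h1 h2 _ _
    rw [List.sublist_nil.mp h1, List.sublist_nil.mp h2]
  | cons a t ih =>
    intro l1 l2 h1 h2 hn hm
    have hant : a ∉ t := (List.nodup_cons.mp hn).1
    have hnt : t.Nodup := (List.nodup_cons.mp hn).2
    rcases List.sublist_cons_iff.mp h1 with h1t | ⟨r1, rfl, h1t⟩ <;>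
      rcases List.sublist_cons_iff.mp h2 with h2t | ⟨r2, rfl, h2t⟩
    · exact ih h1t h2t hnt hm
    · exact absurd (h1t.subset ((hm a).mpr List.mem_cons_self)) hant
    · exact absurd (h2t.subset ((hm a).mp List.mem_cons_self)) hant
    · have : ∀ x, x ∈ r1 ↔ x ∈ r2 := by
        intro x
        constructor
        · intro hx
          rcases List.mem_cons.mp ((hm x).mp (List.mem_cons_of_mem a hx)) with rfl | h
          · exact absurd (h1t.subset hx) hant
          · exact h
        · intro hx
          rcases List.mem_cons.mp ((hm x).mpr (List.mem_cons_of_mem a hx)) with rfl | h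
          · exact absurd (h2t.subset hx) hant
          · exact h
      rw [ih h1t h2t hnt this]

theorem result_sublist (hg : List (List Int × List Int)) :
    (hypergraph_full_cleanup_py hg).Sublist (PySem.Set.ofList hg) := by
  obtain ⟨hsub, _, _⟩ :=
    fold_invariant (hg := hg) (PySem.Set.ofList hg) (PySem.Set.ofList hg)
      (fun x hx => (PySem.Set.mem_ofList hg x).mp hx)
      (fun m hm _ => (PySem.Set.mem_ofList hg m).mpr hm)
  exact hsub

-- ===== VERDICT (by name: the statement is the Claim_ definition above) =====
theorem hypergraph_full_cleanup_py_spec : Claim_equal_hypergraph_full_cleanup_py := by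
  intro hg _ pre
  show hypergraph_full_cleanup_py hg = hypergraph_full_cleanup_py_alt hg
  refine sublist_eq_of_nodup (result_sublist hg) ?_ (PySem.Set.nodup_ofList hg) ?_
  · rw [alt_eq_filter]; exact List.filter_sublist
  · intro x
    rw [mem_result_iff pre, mem_alt_iff]
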